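-- pv_equiv track=rewrite | github.com/quangIO/hoppy | src/hoppy/analyzer.py | _group_api_summary
-- ===== SOURCE A (Python) =====
-- def _group_api_summary(fullnames: list[str]) -> dict[str, list[str]]:
--     summary: dict[str, list[str]] = {}
--     for fn in fullnames:
--         if not isinstance(fn, str):
--             continue
--         # Handle possible Scala-style fullnames with extra info
--         if ":" in fn:
--             parts = fn.split(":")
--             if len(parts) > 1:
--                 fn = parts[1]
--
--         match fn.split("."):
--             case [module, *_, _] if module:
--                 summary.setdefault(module, []).append(fn)
--             case _:
--                 summary.setdefault("builtins", []).append(fn)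
--     return summary
-- ===== SOURCE B (Python) =====
-- def _module_key(fn):
--     """Return (module key, cleaned fullname) for a single entry."""
--     if ":" in fn:
--         parts = fn.split(":")
--         if len(parts) > 1:
--             fn = parts[1]
--     dotted = fn.split(".")
--     key = dotted[0] if len(dotted) >= 2 and dotted[0] else "builtins"
--     return key, fn
--
--
-- def _group_api_summary(fullnames: list[str]) -> dict[str, list[str]]:
--     pairs = [_module_key(fn) for fn in fullnames if isinstance(fn, str)]
--     keys = list(dict.fromkeys(k for k, _ in pairs))
--     return {k: [fn for kk, fn in pairs if kk == k] for k in keys}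
-- ===== Notes on version B (the rewrite author's own statement) =====
-- stated objective: alternative
-- what changed: Replaces A's single pass that mutates a dict via setdefault/append with: map each name to a (module-key, cleaned-name) pair, take the ordered-deduplicated key list (dict.fromkeys), and build each group by one filter pass per distinct key.
import Mathlib
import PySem

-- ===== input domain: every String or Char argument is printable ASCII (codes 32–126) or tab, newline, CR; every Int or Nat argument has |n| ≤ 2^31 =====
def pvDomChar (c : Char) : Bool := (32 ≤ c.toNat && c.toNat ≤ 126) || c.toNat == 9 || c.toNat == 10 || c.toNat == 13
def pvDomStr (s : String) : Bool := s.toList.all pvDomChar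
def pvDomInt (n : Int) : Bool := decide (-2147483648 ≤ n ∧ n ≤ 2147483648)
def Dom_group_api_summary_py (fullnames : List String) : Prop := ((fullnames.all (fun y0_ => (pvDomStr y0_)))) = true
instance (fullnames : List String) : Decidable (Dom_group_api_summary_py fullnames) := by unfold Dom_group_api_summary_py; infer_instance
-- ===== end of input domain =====

-- B groups by building (key, cleaned-name) pairs once, then deduplicated keys + per-key filter,
-- instead of A's single pass mutating a dict; same per-element key logic, different grouping structure (objective: alternative).

-- ===== PORT A =====
-- literal transliteration of _group_api_summary: one dict built in a single pass.
-- (the ':' separator is a nonempty literal, so split? is always `some`; the .getD [] default is never used)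
def group_api_summary_py (fullnames : List String) : List (String × List String) :=
  (fullnames.foldl
    (fun summary fn0 =>
      -- if ":" in fn: parts = fn.split(":"); if len(parts) > 1: fn = parts[1]
      let fn := if PySem.Str.isIn ":" fn0 then
          let parts := (PySem.Str.split? fn0 ":").getD []
          if parts.length > 1 then parts[1]! else fn0
        else fn0
      -- match fn.split("."): case [module, *_, _] if module / case _
      match (PySem.Str.split? fn ".").getD [] with
      | m :: _ :: _ =>
        if m ≠ "" then summary.insert m (summary.getD m [] ++ [fn])
        else summary.insert "builtins" (summary.getD "builtins" [] ++ [fn])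
      | _ => summary.insert "builtins" (summary.getD "builtins" [] ++ [fn]))
    PySem.Dict.empty).items

-- ===== PORT B =====
-- helper _module_key: module key (first dot token if the split has ≥ 2 parts and it is nonempty, else "builtins")
-- together with the cleaned fullname
def pvModuleKey (fn0 : String) : String × String :=
  let fn := if PySem.Str.isIn ":" fn0 then
      let parts := (PySem.Str.split? fn0 ":").getD []
      if parts.length > 1 then parts[1]! else fn0
    else fn0
  let dotted := (PySem.Str.split? fn ".").getD []
  (if 2 ≤ dotted.length ∧ dotted[0]! ≠ "" then dotted[0]! else "builtins", fn)

-- pairs once, keys = ordered dedup (dict.fromkeys), one filter pass per key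
def group_api_summary_py_alt (fullnames : List String) : List (String × List String) :=
  let pairs := fullnames.map pvModuleKey
  let keys := PySem.List.dedup (pairs.map Prod.fst)
  keys.map (fun k => (k, (pairs.filter (fun p => p.1 == k)).map Prod.snd))

-- ===== PRECONDITION & SPEC =====
def Spec_group_api_summary_py (fullnames : List String) (out : List (String × List String)) : Prop := out = group_api_summary_py_alt fullnames
instance (fullnames : List String) (out : List (String × List String)) : Decidable (Spec_group_api_summary_py fullnames out) := by unfold Spec_group_api_summary_py; infer_instance

-- ===== CLAIM (what is proved, stated in full; the proofs are below) =====
def Claim_equal_group_api_summary_py : Prop := ∀ (fullnames : List String), Dom_group_api_summary_py fullnames → Spec_group_api_summary_py fullnames (group_api_summary_py fullnames)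

-- ===== LEMMAS AND PROOFS =====

-- the grouping step both programs perform per (key, value) pair
def pvGStep (d : PySem.Dict String (List String)) (p : String × String) : PySem.Dict String (List String) :=
  d.insert p.1 (d.getD p.1 [] ++ [p.2])

-- A's loop body is exactly pvGStep applied to B's (key, cleaned fn) pair
theorem pvStep_eq (d : PySem.Dict String (List String)) (fn0 : String) :
    (let fn := if PySem.Str.isIn ":" fn0 then
          let parts := (PySem.Str.split? fn0 ":").getD []
          if parts.length > 1 then parts[1]! else fn0
        else fn0
     (match (PySem.Str.split? fn ".").getD [] with
        | m :: _ :: _ =>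
          if m ≠ "" then d.insert m (d.getD m [] ++ [fn])
          else d.insert "builtins" (d.getD "builtins" [] ++ [fn])
        | _ => d.insert "builtins" (d.getD "builtins" [] ++ [fn]))) =
    pvGStep d (pvModuleKey fn0) := by
  unfold pvModuleKey pvGStep
  simp only []
  generalize (if PySem.Str.isIn ":" fn0 then
      let parts := (PySem.Str.split? fn0 ":").getD []
      if parts.length > 1 then parts[1]! else fn0
    else fn0) = fn
  rcases h : (PySem.Str.split? fn ".").getD [] with (_ | ⟨m, (_ | ⟨b, rest⟩)⟩) <;>
    simp [h] <;> by_cases hm : m = "" <;> simp [hm]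

-- fresh key ⇒ no pair of l carries it
theorem pvFilter_nil {α : Type} (l : List (String × α)) (k : String)
    (h : k ∉ l.map Prod.fst) : l.filter (fun p => p.1 == k) = [] := by
  induction l with
  | nil => rfl
  | cons p t ih =>
    simp only [List.map_cons, List.mem_cons, not_or] at h
    simp [Ne.symm h.1, ih h.2]

-- characterisation of the dict-grouping loop: items = ordered-dedup keys with per-key filtered values
theorem pvGroup_items (l : List (String × String)) :
    (l.foldl pvGStep PySem.Dict.empty).items =
      (PySem.List.dedup (l.map Prod.fst)).map
        (fun k => (k, (l.filter (fun p => p.1 == k)).map Prod.snd)) := by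
  induction l using List.reverseRecOn with
  | nil => rfl
  | append_singleton l p ih =>
    rw [List.foldl_append, List.foldl_cons, List.foldl_nil]
    have hkeys : (l.foldl pvGStep PySem.Dict.empty).keys = PySem.List.dedup (l.map Prod.fst) := by
      show (l.foldl pvGStep PySem.Dict.empty).items.map Prod.fst = _
      rw [ih, List.map_map]
      simp [Function.comp_def]
    have hdedup : PySem.List.dedup ((l ++ [p]).map Prod.fst) =
        if p.1 ∈ l.map Prod.fst then PySem.List.dedup (l.map Prod.fst)
        else PySem.List.dedup (l.map Prod.fst) ++ [p.1] := by
      rw [PySem.List.dedup_eq_ofList, PySem.List.dedup_eq_ofList, List.map_append,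
        PySem.Set.ofList_eq_foldl, List.foldl_append, ← PySem.Set.ofList_eq_foldl]
      simp only [List.map_cons, List.map_nil, List.foldl_cons, List.foldl_nil, PySem.Set.add]
      by_cases hmem : p.1 ∈ l.map Prod.fst
      · rw [if_pos hmem, if_pos (by simp [PySem.Set.mem_ofList, hmem])]
      · rw [if_neg hmem, if_neg (by simp [PySem.Set.mem_ofList, hmem])]
    have hcont : (l.foldl pvGStep PySem.Dict.empty).contains p.1 = decide (p.1 ∈ l.map Prod.fst) := by
      rw [PySem.Dict.contains_eq_decide_mem_keys, hkeys]
      simp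
    by_cases hmem : p.1 ∈ l.map Prod.fst
    · -- key already present: insert rewrites in place
      have hc : (l.foldl pvGStep PySem.Dict.empty).contains p.1 = true := by simp [hcont, hmem]
      have hget : (l.foldl pvGStep PySem.Dict.empty).getD p.1 [] =
          (l.filter (fun q => q.1 == p.1)).map Prod.snd := by
        have hnodup : (l.foldl pvGStep PySem.Dict.empty).keys.Nodup := by
          rw [hkeys]; exact PySem.List.nodup_dedup _
        have hitem : (p.1, (l.filter (fun q => q.1 == p.1)).map Prod.snd) ∈
            (l.foldl pvGStep PySem.Dict.empty).items := by
          rw [ih]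
          exact List.mem_map_of_mem (by simp [hmem])
        rw [PySem.Dict.getD_eq_get?_getD, PySem.Dict.get?_of_mem_items _ hitem hnodup]
        rfl
      rw [pvGStep, PySem.Dict.items_insert_of_contains _ _ hc, ih, hdedup, if_pos hmem,
        List.map_map]
      refine List.map_congr_left (fun k hk => ?_)
      simp only [Function.comp_apply, List.filter_append, List.map_append]
      by_cases hkp : k = p.1
      · subst hkp
        simp [hget]
      · have : ¬ (p.1 == k) = true := by simp [Ne.symm hkp]
        simp [this, hkp]
    · -- fresh key: insert appends
      have hc : (l.foldl pvGStep PySem.Dict.empty).contains p.1 = false := by simp [hcont, hmem]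
      rw [pvGStep, PySem.Dict.items_insert_of_not_contains _ _ hc,
        PySem.Dict.getD_of_not_contains _ _ hc, ih, hdedup, if_neg hmem, List.map_append]
      congr 1
      · refine List.map_congr_left (fun k hk => ?_)
        have hkp : k ≠ p.1 := by
          rintro rfl
          exact hmem ((PySem.List.mem_dedup _ _).mp hk)
        have : ¬ (p.1 == k) = true := by simp [Ne.symm hkp]
        simp [List.filter_append, this]
      · simp [List.filter_append, List.filter_cons, pvFilter_nil l p.1 hmem]

-- ===== VERDICT (by name: the statement is the Claim_ definition above) =====
theorem group_api_summary_py_spec : Claim_equal_group_api_summary_py := by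
  intro fullnames _
  unfold Spec_group_api_summary_py group_api_summary_py group_api_summary_py_alt
  have hstep : fullnames.foldl
      (fun summary fn0 =>
        let fn := if PySem.Str.isIn ":" fn0 then
            let parts := (PySem.Str.split? fn0 ":").getD []
            if parts.length > 1 then parts[1]! else fn0
          else fn0
        match (PySem.Str.split? fn ".").getD [] with
        | m :: _ :: _ =>
          if m ≠ "" then summary.insert m (summary.getD m [] ++ [fn])
          else summary.insert "builtins" (summary.getD "builtins" [] ++ [fn])
        | _ => summary.insert "builtins" (summary.getD "builtins" [] ++ [fn]))
      PySem.Dict.empty = (fullnames.map pvModuleKey).foldl pvGStep PySem.Dict.empty := by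
    rw [List.foldl_map]
    congr 1
    funext d fn
    exact pvStep_eq d fn
  rw [hstep, pvGroup_items]
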